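-- pv_equiv track=rewrite | github.com/pypi-data/pypi-mirror-98 | packages/pyridl/pyridl-0.1.0.tar.gz/pyridl-0.1.0/src/iridl_utils.py | gen_valid_identifier
-- ===== SOURCE A (Python) =====
-- def gen_valid_identifier(seq):
--     """https://stackoverflow.com/questions/10120295/valid-characters-in-a-python-class-name"""
--     itr = iter(seq)                             # get an iterator
--     # pull characters until we get a legal one for first in identifer
--     for ch in itr:
--         if ch == '_' or ch.isalpha():
--             yield ch
--             break
--     # pull remaining characters and yield legal ones for identifier
--     for ch in itr:
--         if ch == '_' or ch.isalpha() or ch.isdigit():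
--             yield ch
-- ===== SOURCE B (Python) =====
-- def gen_valid_identifier(seq):
--     """Two staged whole-string passes: keep every identifier-continuation
--     character, then drop the leading digits of what remains (a digit can
--     never start an identifier)."""
--     kept = [c for c in seq if c == '_' or c.isalpha() or c.isdigit()]
--     i = 0
--     while i < len(kept) and kept[i].isdigit():
--         i += 1
--     yield from kept[i:]
-- ===== Notes on version B (the rewrite author's own statement) =====
-- stated objective: alternative
-- what changed: Replaces A's skip-to-first-start-char-then-filter-the-remainder over one shared iterator with a filter-then-dropwhile algorithm: keep all continuation characters of the whole string, then drop the leading digits (correct because start chars are exactly the non-digit continuation chars).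
import Mathlib
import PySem

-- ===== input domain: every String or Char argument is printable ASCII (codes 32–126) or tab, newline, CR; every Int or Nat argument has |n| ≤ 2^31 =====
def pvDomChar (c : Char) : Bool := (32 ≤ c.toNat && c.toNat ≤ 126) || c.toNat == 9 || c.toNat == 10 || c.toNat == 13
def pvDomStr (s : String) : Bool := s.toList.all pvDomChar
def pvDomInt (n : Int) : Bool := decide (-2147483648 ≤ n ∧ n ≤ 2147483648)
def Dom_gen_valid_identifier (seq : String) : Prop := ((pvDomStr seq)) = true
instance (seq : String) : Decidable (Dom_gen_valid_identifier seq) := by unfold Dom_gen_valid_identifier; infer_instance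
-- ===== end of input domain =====

-- B replaces A's skip-then-filter over one shared iterator with filter-then-dropwhile
-- (keep all continuation chars, drop leading digits); same cost, alternative algorithm.

-- ===== PORT A =====
-- second loop of A: filter the remaining characters by the continuation rule
def pvA_rest (cs : List Char) : List String :=
  match cs with
  | [] => []
  | c :: t =>
    if c == '_' || PySem.Chars.isalpha c || PySem.Chars.isdigit c
    then String.ofList [c] :: pvA_rest t
    else pvA_rest t

-- first loop of A: scan until a legal start character, yield it, break to the second loop
def pvA_first (cs : List Char) : List String :=
  match cs with
  | [] => []
  | c :: t =>
    if c == '_' || PySem.Chars.isalpha c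
    then String.ofList [c] :: pvA_rest t
    else pvA_first t

def gen_valid_identifier (seq : String) : List String := pvA_first seq.toList

-- ===== PORT B =====
def pvContCh (c : Char) : Bool := c == '_' || PySem.Chars.isalpha c || PySem.Chars.isdigit c

def gen_valid_identifier_alt (seq : String) : List String :=
  let kept := seq.toList.filter pvContCh
  (kept.dropWhile PySem.Chars.isdigit).map (fun c => String.ofList [c])

-- ===== PRECONDITION & SPEC =====
def Spec_gen_valid_identifier (seq : String) (out : List String) : Prop := out = gen_valid_identifier_alt seq
instance (seq : String) (out : List String) : Decidable (Spec_gen_valid_identifier seq out) := by unfold Spec_gen_valid_identifier; infer_instance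

-- ===== CLAIM (what is proved, stated in full; the proofs are below) =====
def Claim_equal_gen_valid_identifier : Prop := ∀ (seq : String), Dom_gen_valid_identifier seq → Spec_gen_valid_identifier seq (gen_valid_identifier seq)

-- ===== LEMMAS AND PROOFS =====
-- a legal start character is never a digit (disjoint code-point ranges)
theorem pv_start_not_digit (c : Char) (h : (c == '_' || PySem.Chars.isalpha c) = true) :
    PySem.Chars.isdigit c = false := by
  simp only [PySem.Chars.isalpha, PySem.Chars.isupper, PySem.Chars.islower,
    PySem.Chars.isdigit, Bool.or_eq_true, beq_iff_eq, decide_eq_true_eq,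
    Bool.and_eq_true, Bool.and_eq_false_iff, decide_eq_false_iff_not, not_le] at *
  rcases h with h | h | h
  · subst h; decide
  · right; rcases h with ⟨h1, h2⟩
    exact lt_of_lt_of_le (by decide) h1
  · right; rcases h with ⟨h1, h2⟩
    exact lt_of_lt_of_le (by decide) h1

theorem pvA_rest_eq (cs : List Char) :
    pvA_rest cs = (cs.filter pvContCh).map (fun c => String.ofList [c]) := by
  induction cs with
  | nil => rfl
  | cons c t ih =>
    simp only [pvA_rest, List.filter_cons, pvContCh]
    by_cases h : (c == '_' || PySem.Chars.isalpha c || PySem.Chars.isdigit c) = true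
    · simp [h, ih]
    · simp [h, ih]

theorem pvA_first_eq (cs : List Char) :
    pvA_first cs = ((cs.filter pvContCh).dropWhile PySem.Chars.isdigit).map (fun c => String.ofList [c]) := by
  induction cs with
  | nil => rfl
  | cons c t ih =>
    by_cases hs : (c == '_' || PySem.Chars.isalpha c) = true
    · have hc : pvContCh c = true := by
        simp only [pvContCh, Bool.or_eq_true] at *
        rcases hs with h | h
        · exact Or.inl (Or.inl h)
        · exact Or.inl (Or.inr h)
      have hd := pv_start_not_digit c hs
      simp [pvA_first, hs, hc, hd, pvA_rest_eq]
    · by_cases hd : PySem.Chars.isdigit c = true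
      · have hc : pvContCh c = true := by
          simp only [pvContCh, Bool.or_eq_true]; exact Or.inr hd
        simp [pvA_first, hs, hc, hd, ih]
      · have hc : pvContCh c = false := by
          simp only [pvContCh]
          simp only [Bool.or_eq_true, not_or] at hs ⊢
          cases h2 : PySem.Chars.isdigit c with
          | true => exact absurd h2 hd
          | false => simp [hs.1, hs.2]
        simp [pvA_first, hs, hc, ih]

-- ===== VERDICT (by name: the statement is the Claim_ definition above) =====
theorem gen_valid_identifier_spec : Claim_equal_gen_valid_identifier := by
  intro seq _
  unfold Spec_gen_valid_identifier gen_valid_identifier gen_valid_identifier_alt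
  exact pvA_first_eq seq.toList
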